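-- pv_equiv track=rewrite | github.com/Rivejjj/distribuidos-tp1 | queries/query2.py | get_year_regex
-- ===== SOURCE A (Python) =====
-- def get_year_regex(text):
--     if text == "":
--         return None
--     i = 0
--     while i < len(text):
--         if text[i].isdigit():
--             digits = ""
--             while i < len(text) and text[i].isdigit() and len(digits) < 4:
--                 digits += text[i]
--                 i += 1
--             if len(digits) == 4:
--                 return int(digits)
--         else:
--             i += 1
--     return None
-- ===== SOURCE B (Python) =====
-- def get_year_regex(text):
--     # Sliding window: first position where four consecutive chars are digits.
--     i = 0
--     while i + 4 <= len(text):
--         w = text[i:i+4]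
--         if w.isdigit():
--             return int(w)
--         i += 1
--     return None
-- ===== Notes on version B (the rewrite author's own statement) =====
-- stated objective: simpler
-- what changed: Replaces A's nested while loops (accumulating a digit run of up to 4 chars, then testing its length) with a single sliding-window scan that tests each 4-char window directly.
import Mathlib
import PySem

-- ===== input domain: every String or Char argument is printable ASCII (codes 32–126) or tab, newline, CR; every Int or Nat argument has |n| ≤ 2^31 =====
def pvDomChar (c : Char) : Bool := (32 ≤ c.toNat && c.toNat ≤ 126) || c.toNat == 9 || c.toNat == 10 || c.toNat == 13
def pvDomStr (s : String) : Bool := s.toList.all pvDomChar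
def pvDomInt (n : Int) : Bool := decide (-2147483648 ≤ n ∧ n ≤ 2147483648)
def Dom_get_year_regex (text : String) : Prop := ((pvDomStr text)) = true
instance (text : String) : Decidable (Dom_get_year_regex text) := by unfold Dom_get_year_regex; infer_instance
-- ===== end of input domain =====

-- B replaces A's nested while loops (digit-run accumulation) with a single
-- sliding-window scan over 4-char windows; objective: simpler.

-- ===== PORT A =====
-- inner while loop: `while i < len(text) and text[i].isdigit() and len(digits) < 4`
-- (i ↦ remaining suffix); returns (digits, remaining suffix)
def pvInnerA : List Char → List Char → List Char × List Char
  | [], digits => (digits, [])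
  | c :: rest, digits =>
      if PySem.Chars.isdigit c && digits.length < 4 then
        pvInnerA rest (digits ++ [c])
      else (digits, c :: rest)

theorem pvInnerA_len_le (cs digits : List Char) : (pvInnerA cs digits).2.length ≤ cs.length := by
  induction cs generalizing digits with
  | nil => simp [pvInnerA]
  | cons c rest ih =>
      simp only [pvInnerA]
      split
      · exact le_trans (ih _) (by simp)
      · simp

-- outer while loop, i ↦ remaining suffix
def pvOuterA : List Char → Option Int
  | [] => none
  | c :: rest =>
      if PySem.Chars.isdigit c then
        let p := pvInnerA (c :: rest) []
        -- `int(digits)`: exact — digits are 4 ASCII digit chars here, so ofChars? = some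
        if p.1.length == 4 then PySem.Int.ofChars? p.1
        else pvOuterA p.2
      else pvOuterA rest
termination_by cs => cs.length
decreasing_by
  · have h2 : (pvInnerA (c :: rest) []).2.length ≤ rest.length := by
      simp only [pvInnerA]
      rw [if_pos (by simp [*])]
      exact pvInnerA_len_le rest [c]
    simpa using Nat.lt_succ_of_le h2
  · simp

def get_year_regex (text : String) : Option Int :=
  if text = "" then none else pvOuterA text.toList

-- ===== PORT B =====
-- sliding window: test each 4-char window `w = text[i:i+4]` with w.isdigit()
def pvLoopB : List Char → Option Int
  | c1 :: c2 :: c3 :: c4 :: rest =>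
      if PySem.Chars.strIsdigit [c1, c2, c3, c4] then
        PySem.Int.ofChars? [c1, c2, c3, c4]   -- int(w), exact: w is 4 digit chars
      else pvLoopB (c2 :: c3 :: c4 :: rest)
  | _ => none

def get_year_regex_alt (text : String) : Option Int := pvLoopB text.toList

-- ===== PRECONDITION & SPEC =====
def Spec_get_year_regex (text : String) (out : Option Int) : Prop := out = get_year_regex_alt text
instance (text : String) (out : Option Int) : Decidable (Spec_get_year_regex text out) := by unfold Spec_get_year_regex; infer_instance

-- ===== CLAIM (what is proved, stated in full; the proofs are below) =====
def Claim_equal_get_year_regex : Prop := ∀ (text : String), Dom_get_year_regex text → Spec_get_year_regex text (get_year_regex text)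

-- ===== LEMMAS AND PROOFS =====

-- Sliding lemmas for B: a non-digit among the first 4 chars rules out every
-- window that contains it, so the scan passes over it.
theorem pvInnerA_full (cs digits : List Char) (h : ¬ digits.length < 4) :
    pvInnerA cs digits = (digits, cs) := by
  cases cs <;> simp [pvInnerA, h]

theorem pvSlide1 (c : Char) (rs : List Char) (h : PySem.Chars.isdigit c = false) :
    pvLoopB (c :: rs) = pvLoopB rs := by
  rcases rs with _ | ⟨a, _ | ⟨b, _ | ⟨d, t⟩⟩⟩ <;>
    simp [pvLoopB, PySem.Chars.strIsdigit, h]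

theorem pvSlide2 (c a : Char) (rs : List Char) (h : PySem.Chars.isdigit a = false) :
    pvLoopB (c :: a :: rs) = pvLoopB (a :: rs) := by
  rcases rs with _ | ⟨b, _ | ⟨d, t⟩⟩ <;>
    simp [pvLoopB, PySem.Chars.strIsdigit, h]

theorem pvSlide3 (c a b : Char) (rs : List Char) (h : PySem.Chars.isdigit b = false) :
    pvLoopB (c :: a :: b :: rs) = pvLoopB (b :: rs) := by
  rcases rs with _ | ⟨d, _ | ⟨e, t⟩⟩ <;>
    simp [pvLoopB, PySem.Chars.strIsdigit, h]

theorem pvSlide4 (c a b d : Char) (rs : List Char) (h : PySem.Chars.isdigit d = false) :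
    pvLoopB (c :: a :: b :: d :: rs) = pvLoopB (d :: rs) := by
  rcases rs with _ | ⟨e, _ | ⟨f, t⟩⟩ <;>
    simp [pvLoopB, PySem.Chars.strIsdigit, h]

theorem pvKeyEq : ∀ (n : Nat) (cs : List Char), cs.length ≤ n → pvOuterA cs = pvLoopB cs := by
  intro n
  induction n with
  | zero =>
      intro cs h
      have : cs = [] := List.eq_nil_of_length_eq_zero (Nat.le_zero.mp h)
      subst this; simp [pvOuterA, pvLoopB]
  | succ n ih =>
      intro cs hlen
      match cs with
      | [] => simp [pvOuterA, pvLoopB]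
      | c :: rest =>
        cases hc : PySem.Chars.isdigit c with
        | false =>
            rw [pvSlide1 c rest hc]
            simp only [pvOuterA, hc, Bool.false_eq_true, if_false]
            exact ih rest (by simpa using Nat.le_of_succ_le_succ (by simpa using hlen))
        | true =>
          match rest with
          | [] => simp [pvOuterA, pvInnerA, pvLoopB, hc]
          | c2 :: rest2 =>
            cases hc2 : PySem.Chars.isdigit c2 with
            | false =>
                rw [pvSlide2 c c2 rest2 hc2]
                simp only [pvOuterA, pvInnerA, hc, hc2]
                simp only [List.length_nil, List.length_append, List.length_cons]
                norm_num
                exact ih (c2 :: rest2) (by simp at hlen ⊢; omega)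
            | true =>
              match rest2 with
              | [] => simp [pvOuterA, pvInnerA, pvLoopB, hc, hc2]
              | c3 :: rest3 =>
                cases hc3 : PySem.Chars.isdigit c3 with
                | false =>
                    rw [pvSlide3 c c2 c3 rest3 hc3]
                    simp only [pvOuterA, pvInnerA, hc, hc2, hc3]
                    norm_num
                    exact ih (c3 :: rest3) (by simp at hlen ⊢; omega)
                | true =>
                  match rest3 with
                  | [] => simp [pvOuterA, pvInnerA, pvLoopB, hc, hc2, hc3]
                  | c4 :: rest4 =>
                    cases hc4 : PySem.Chars.isdigit c4 with
                    | false =>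
                        rw [pvSlide4 c c2 c3 c4 rest4 hc4]
                        simp only [pvOuterA, pvInnerA, hc, hc2, hc3, hc4]
                        norm_num
                        exact ih (c4 :: rest4) (by simp at hlen ⊢; omega)
                    | true =>
                        simp only [pvOuterA, pvInnerA, hc, hc2, hc3, hc4, pvLoopB,
                          PySem.Chars.strIsdigit]
                        norm_num
                        rw [pvInnerA_full rest4 [c, c2, c3, c4] (by simp)]
                        simp [hc, hc2, hc3, hc4]

-- ===== VERDICT (by name: the statement is the Claim_ definition above) =====
theorem get_year_regex_spec : Claim_equal_get_year_regex := by
  intro text _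
  unfold Spec_get_year_regex get_year_regex get_year_regex_alt
  by_cases h : text = ""
  · subst h; rfl
  · rw [if_neg h]
    exact pvKeyEq text.toList.length text.toList le_rfl
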